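-- pv_equiv track=rewrite | github.com/billthefighter/LLMaestro | scripts/update_readme_badges.py | group_models_by_provider
-- ===== SOURCE A (Python) =====
-- from typing import Dict, List, Literal, Optional, Tuple
--
-- def group_models_by_provider(results: Dict[str, Dict[str, str]]) -> Dict[str, List[Tuple[str, str, Optional[str]]]]:
--     """Group models by their provider (Anthropic, OpenAI, etc).
--
--     Returns:
--         Dict mapping provider name to list of (model_name, status, description) tuples
--     """
--     providers = {}
--
--     for model_name, data in results.items():
--         family = data.get("family", "unknown")
--         status = data.get("result", "skip")
--         description = data.get("description")
--
--         if family not in providers: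
--             providers[family] = []
--
--         providers[family].append((model_name, status, description))
--
--     # Sort models within each provider
--     for provider in providers.values():
--         provider.sort(key=lambda x: x[0])
--
--     return providers
-- ===== SOURCE B (Python) =====
-- def group_models_by_provider(results):
--     """Group models by their provider (Anthropic, OpenAI, etc).
--
--     Returns:
--         Dict mapping provider name to list of (model_name, status, description) tuples
--     """
--     # Register provider buckets in first-appearance order, then fill them in a
--     # single pass over the globally name-sorted items: each bucket comes out
--     # already sorted (the sort is stable), so no per-provider sort is needed.
--     providers = {}
--     for data in results.values():
--         providers.setdefault(data.get("family", "unknown"), [])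
--     for model_name, data in sorted(results.items(), key=lambda kv: kv[0]):
--         providers[data.get("family", "unknown")].append(
--             (model_name, data.get("result", "skip"), data.get("description"))
--         )
--     return providers
-- ===== Notes on version B (the rewrite author's own statement) =====
-- stated objective: alternative
-- what changed: A groups first and then sorts every provider bucket separately; B pre-registers the buckets and fills them in one pass over the globally name-sorted items, so stability makes every bucket come out sorted with no per-group sort.
import Mathlib
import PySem

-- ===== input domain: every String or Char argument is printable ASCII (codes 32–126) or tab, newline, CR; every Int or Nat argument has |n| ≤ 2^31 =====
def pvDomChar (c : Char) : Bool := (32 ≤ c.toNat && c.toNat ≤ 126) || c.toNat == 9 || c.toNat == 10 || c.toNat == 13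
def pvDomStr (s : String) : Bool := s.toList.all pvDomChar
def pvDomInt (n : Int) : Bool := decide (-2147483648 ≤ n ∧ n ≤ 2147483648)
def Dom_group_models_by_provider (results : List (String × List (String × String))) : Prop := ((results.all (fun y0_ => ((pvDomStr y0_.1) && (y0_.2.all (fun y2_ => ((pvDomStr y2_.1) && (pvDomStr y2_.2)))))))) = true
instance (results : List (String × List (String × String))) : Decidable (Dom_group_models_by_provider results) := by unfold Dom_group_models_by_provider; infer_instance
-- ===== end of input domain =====

-- ===== PORT A =====
-- B changes the decomposition: A groups then sorts each bucket; B fills pre-registered buckets in one pass over the globally name-sorted items (alternative, same cost).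
def group_models_by_provider (results : List (String × List (String × String))) : List (String × List (String × String × Option String)) :=
  -- for model_name, data in results.items(): ... (dict build loop)
  let providers : PySem.Dict String (List (String × String × Option String)) :=
    results.foldl (fun providers x =>
      let d := PySem.Dict.mk x.2
      let family := d.getD "family" "unknown"
      let status := d.getD "result" "skip"
      let description := d.get? "description"
      let providers := if providers.contains family then providers else providers.insert family []
      -- providers[family].append((model_name, status, description))
      providers.modify family [] (fun l => l ++ [(x.1, status, description)])) PySem.Dict.empty
  -- for provider in providers.values(): provider.sort(key=lambda x: x[0])
  providers.items.map (fun p => (p.1, PySem.List.sorted p.2 (fun t => t.1) false))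

-- ===== PORT B =====
def group_models_by_provider_alt (results : List (String × List (String × String))) : List (String × List (String × String × Option String)) :=
  -- for data in results.values(): providers.setdefault(data.get("family", "unknown"), [])
  let providers : PySem.Dict String (List (String × String × Option String)) :=
    results.foldl (fun providers x =>
      let family := (PySem.Dict.mk x.2).getD "family" "unknown"
      if providers.contains family then providers else providers.insert family []) PySem.Dict.empty
  -- for model_name, data in sorted(results.items(), key=lambda kv: kv[0]): providers[family].append(...)
  -- (the key is always present; 'providers[family].append(t)' is modify with the present value)
  let providers :=
    (PySem.List.sorted results (fun kv => kv.1) false).foldl (fun providers x =>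
      let d := PySem.Dict.mk x.2
      providers.modify (d.getD "family" "unknown") []
        (fun l => l ++ [(x.1, d.getD "result" "skip", d.get? "description")])) providers
  providers.items
-- ===== PRECONDITION & SPEC =====
def Spec_group_models_by_provider (results : List (String × List (String × String))) (out : List (String × List (String × String × Option String))) : Prop := out = group_models_by_provider_alt results
instance (results : List (String × List (String × String))) (out : List (String × List (String × String × Option String))) : Decidable (Spec_group_models_by_provider results out) := by unfold Spec_group_models_by_provider; infer_instance

-- ===== CLAIM (what is proved, stated in full; the proofs are below) =====
def Claim_equal_group_models_by_provider : Prop := ∀ (results : List (String × List (String × String))), Dom_group_models_by_provider results → Spec_group_models_by_provider results (group_models_by_provider results)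

-- ===== LEMMAS AND PROOFS =====

-- the provider key and the (name, status, description) entry of one item
def pvFam (x : String × List (String × String)) : String :=
  (PySem.Dict.mk x.2).getD "family" "unknown"

def pvTrip (x : String × List (String × String)) : String × String × Option String :=
  (x.1, (PySem.Dict.mk x.2).getD "result" "skip", (PySem.Dict.mk x.2).get? "description")

def pvPairs (L : List (String × List (String × String))) :
    List (String × (String × String × Option String)) :=
  L.map (fun x => (pvFam x, pvTrip x))

-- the grouping dict A's loop builds, in (key, value)-pair form
def pvDictA (L : List (String × List (String × String))) :
    PySem.Dict String (List (String × String × Option String)) :=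
  (pvPairs L).foldl (fun d p => d.modify p.1 [] (fun l => l ++ [p.2])) PySem.Dict.empty

-- the empty buckets B's first loop builds
def pvDictB0 (L : List (String × List (String × String))) :
    PySem.Dict String (List (String × String × Option String)) :=
  L.foldl (fun d x => d.setdefault (pvFam x) []) PySem.Dict.empty

-- the dict B's second loop builds
def pvDictB (L : List (String × List (String × String))) :
    PySem.Dict String (List (String × String × Option String)) :=
  (pvPairs (PySem.List.sorted L (fun kv => kv.1) false)).foldl
    (fun d p => d.modify p.1 [] (fun l => l ++ [p.2])) (pvDictB0 L)

lemma pv_modify_setdefault (d : PySem.Dict String (List (String × String × Option String)))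
    (k : String) (f : List (String × String × Option String) → List (String × String × Option String)) :
    ((if d.contains k then d else d.insert k []).modify k [] f) = d.modify k [] f := by
  by_cases h : d.contains k
  · simp [h]
  · have h' : d.contains k = false := by simpa using h
    simp [h', PySem.Dict.modify, PySem.Dict.insert_insert_self, PySem.Dict.getD_insert_self,
      PySem.Dict.getD_of_not_contains]

lemma pv_if_insert_eq_setdefault (d : PySem.Dict String (List (String × String × Option String)))
    (k : String) :
    (if d.contains k then d else d.insert k ([] : List (String × String × Option String)))
      = d.setdefault k [] := by
  by_cases h : d.contains k
  · simp [h, PySem.Dict.setdefault]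
  · have h' : d.contains k = false := by simpa using h
    simp [h', PySem.Dict.setdefault, PySem.Dict.insert]

lemma pv_keys_setdefault {ν : Type} (d : PySem.Dict String ν) (k : String) (v : ν) :
    (d.setdefault k v).keys = PySem.Set.add d.keys k := by
  by_cases h : d.contains k
  · rw [PySem.Dict.setdefault_of_contains _ _ h]
    have hm : k ∈ d.keys := (PySem.Dict.contains_iff_mem_keys d k).mp h
    simp [PySem.Set.add, PySem.Set.contains, hm]
  · have h' : d.contains k = false := by simpa using h
    have hm : k ∉ d.keys := fun hm => by
      simp [(PySem.Dict.contains_iff_mem_keys d k).mpr hm] at h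
    rw [PySem.Dict.setdefault_of_not_contains _ _ h',
      PySem.Dict.keys_insert_of_not_contains _ _ h']
    simp [PySem.Set.add, PySem.Set.contains, hm]

lemma pv_B0_keys_aux (L : List (String × List (String × String)))
    (d : PySem.Dict String (List (String × String × Option String))) :
    (L.foldl (fun d x => d.setdefault (pvFam x) []) d).keys
      = PySem.Set.update d.keys (L.map pvFam) := by
  induction L generalizing d with
  | nil => rfl
  | cons x L ih =>
    simp only [List.foldl_cons, List.map_cons]
    rw [ih, pv_keys_setdefault]
    rfl

lemma pv_B0_getD_aux (L : List (String × List (String × String)))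
    (d : PySem.Dict String (List (String × String × Option String))) (c : String) :
    (L.foldl (fun d x => d.setdefault (pvFam x) []) d).getD c [] = d.getD c [] := by
  induction L generalizing d with
  | nil => rfl
  | cons x L ih =>
    simp only [List.foldl_cons]
    rw [ih]
    by_cases hc : c = pvFam x
    · rw [hc]; exact PySem.Dict.getD_setdefault_self d (pvFam x) [] []
    · rw [PySem.Dict.getD_eq_get?_getD, PySem.Dict.get?_setdefault_of_ne d _ hc,
        ← PySem.Dict.getD_eq_get?_getD]

lemma pv_B0_keys (L : List (String × List (String × String))) :
    (pvDictB0 L).keys = PySem.Set.ofList (L.map pvFam) := by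
  rw [pvDictB0, pv_B0_keys_aux]; rfl

lemma pv_update_eq_self (s : PySem.Set String) (m : List String) (h : ∀ x ∈ m, x ∈ s) :
    PySem.Set.update s m = s := by
  induction m with
  | nil => rfl
  | cons x m ih =>
    have hx : PySem.Set.add s x = s := by
      simp [PySem.Set.add, PySem.Set.contains, h x (List.mem_cons_self)]
    show (x :: m).foldl PySem.Set.add s = s
    rw [List.foldl_cons, hx]
    exact ih (fun y hy => h y (List.mem_cons_of_mem x hy))

-- insertBy places x in front when it is strictly below everything
lemma pv_insertBy_front {α : Type} (lt : α → α → Bool) (x : α) (l : List α)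
    (h : ∀ z ∈ l, lt x z = true) : PySem.List.insertBy lt x l = x :: l := by
  cases l with
  | nil => rfl
  | cons y ys => simp [PySem.List.insertBy, h y List.mem_cons_self]

lemma pv_insertBy_map {α β : Type} (lt : α → α → Bool) (lt' : β → β → Bool) (g : α → β)
    (hc : ∀ a b, lt' (g a) (g b) = lt a b) (x : α) (l : List α) :
    (PySem.List.insertBy lt x l).map g = PySem.List.insertBy lt' (g x) (l.map g) := by
  induction l with
  | nil => rfl
  | cons y ys ih =>
    by_cases h : lt x y
    · simp [PySem.List.insertBy, h, hc]
    · have h' : lt x y = false := by simpa using h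
      simp [PySem.List.insertBy, h', hc, ih]

-- filtering commutes with inserting into a key-sorted list
lemma pv_filter_insertBy {α κ : Type} [LinearOrder κ] (key : α → κ) (P : α → Bool) (x : α)
    (l : List α) (hl : l.Pairwise (fun a b => key a ≤ key b)) :
    (PySem.List.insertBy (fun a b => decide (key a < key b)) x l).filter P
      = if P x then PySem.List.insertBy (fun a b => decide (key a < key b)) x (l.filter P)
        else l.filter P := by
  induction l with
  | nil =>
    cases hPx : P x <;> simp [PySem.List.insertBy, List.filter, hPx]
  | cons y ys ih =>
    obtain ⟨hy, hys⟩ := List.pairwise_cons.mp hl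
    by_cases hxy : key x < key y
    · rw [show PySem.List.insertBy (fun a b => decide (key a < key b)) x (y :: ys)
          = x :: y :: ys from by simp [PySem.List.insertBy, hxy]]
      cases hPx : P x
      · simp [hPx]
      · have hfront : PySem.List.insertBy (fun a b => decide (key a < key b)) x
            ((y :: ys).filter P) = x :: (y :: ys).filter P := by
          apply pv_insertBy_front
          intro z hz
          have hzmem := List.mem_of_mem_filter hz
          rcases List.mem_cons.mp hzmem with h | h
          · subst h; simpa using hxy
          · simpa using lt_of_lt_of_le hxy (hy z h)
        rw [hfront]
        simp [hPx]
    · have hxy' : decide (key x < key y) = false := by simpa using hxy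
      rw [show PySem.List.insertBy (fun a b => decide (key a < key b)) x (y :: ys)
          = y :: PySem.List.insertBy (fun a b => decide (key a < key b)) x ys from by
            simp [PySem.List.insertBy, hxy']]
      cases hPy : P y <;> cases hPx : P x <;>
        simp [hPy, hPx, ih hys, PySem.List.insertBy, hxy']

lemma pv_sorted_snoc {α κ : Type} [LinearOrder κ] (key : α → κ) (M : List α) (x : α) :
    PySem.List.sorted (M ++ [x]) key false
      = PySem.List.insertBy (fun a b => decide (key a < key b)) x
          (PySem.List.sorted M key false) := by
  rw [PySem.List.sorted_eq_foldl_insertBy, PySem.List.sorted_eq_foldl_insertBy,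
    List.foldl_append]
  rfl

lemma pv_sorted_filter {α κ : Type} [LinearOrder κ] (key : α → κ) (P : α → Bool)
    (L : List α) :
    PySem.List.sorted (L.filter P) key false = (PySem.List.sorted L key false).filter P := by
  induction L using List.reverseRecOn with
  | nil => rfl
  | append_singleton M x ih =>
    rw [List.filter_append, pv_sorted_snoc,
      pv_filter_insertBy key P x _ (PySem.List.sorted_pairwise M key)]
    cases hPx : P x
    · simp [List.filter, hPx, ih]
    · simp only [List.filter, hPx, if_true]
      rw [pv_sorted_snoc, ih]

lemma pv_sorted_map {α β κ : Type} [LinearOrder κ] (g : α → β) (key : α → κ) (key' : β → κ)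
    (h : ∀ a, key' (g a) = key a) (N : List α) :
    PySem.List.sorted (N.map g) key' false = (PySem.List.sorted N key false).map g := by
  induction N using List.reverseRecOn with
  | nil => rfl
  | append_singleton M x ih =>
    rw [List.map_append, List.map_singleton, pv_sorted_snoc, pv_sorted_snoc, ih]
    exact (pv_insertBy_map (fun a b => decide (key a < key b))
      (fun a b => decide (key' a < key' b)) g (fun a b => by simp [h]) x _).symm

lemma pv_dictA_items (L : List (String × List (String × String))) :
    (pvDictA L).items
      = (PySem.Set.ofList (L.map pvFam)).map
          (fun k => (k, ((pvPairs L).filter (fun p => p.1 == k)).map (fun p => p.2))) := by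
  have hk : (pvDictA L).keys = PySem.Set.ofList (L.map pvFam) := by
    rw [pvDictA, PySem.Dict.keys_foldl_modify_key ((pvPairs L)) (fun p => p.1) []
      (fun _ p => fun l => l ++ [p.2]) PySem.Dict.empty]
    have : (pvPairs L).map (fun p => p.1) = L.map pvFam := by
      simp [pvPairs]
    rw [this]
    rfl
  have hnd : (pvDictA L).keys.Nodup := by rw [hk]; exact PySem.Set.nodup_ofList _
  rw [PySem.Dict.items_eq_map_keys _ hnd [], hk]
  apply List.map_congr_left
  intro k _
  have hg : (pvDictA L).getD k []
      = ((pvPairs L).filter (fun p => p.1 == k)).map (fun p => p.2) := by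
    rw [pvDictA, PySem.Dict.getD_foldl_modify_append]
    simp
  rw [hg]

lemma pv_dictB_items (L : List (String × List (String × String))) :
    (pvDictB L).items
      = (PySem.Set.ofList (L.map pvFam)).map
          (fun k => (k, ((pvPairs (PySem.List.sorted L (fun kv => kv.1) false)).filter
              (fun p => p.1 == k)).map (fun p => p.2))) := by
  have hsub : ∀ x ∈ (PySem.List.sorted L (fun kv => kv.1) false).map pvFam,
      x ∈ PySem.Set.ofList (L.map pvFam) := by
    intro x hx
    rw [PySem.Set.mem_ofList]
    exact ((PySem.List.sorted_perm L (fun kv => kv.1) false).map pvFam).mem_iff.mp hx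
  have hk : (pvDictB L).keys = PySem.Set.ofList (L.map pvFam) := by
    rw [pvDictB, PySem.Dict.keys_foldl_modify_key
      ((pvPairs (PySem.List.sorted L (fun kv => kv.1) false))) (fun p => p.1) []
      (fun _ p => fun l => l ++ [p.2]) (pvDictB0 L)]
    have : (pvPairs (PySem.List.sorted L (fun kv => kv.1) false)).map (fun p => p.1)
        = (PySem.List.sorted L (fun kv => kv.1) false).map pvFam := by
      simp [pvPairs]
    rw [this, pv_B0_keys, pv_update_eq_self _ _ hsub]
  have hnd : (pvDictB L).keys.Nodup := by rw [hk]; exact PySem.Set.nodup_ofList _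
  rw [PySem.Dict.items_eq_map_keys _ hnd [], hk]
  apply List.map_congr_left
  intro k _
  have hg : (pvDictB L).getD k []
      = ((pvPairs (PySem.List.sorted L (fun kv => kv.1) false)).filter
          (fun p => p.1 == k)).map (fun p => p.2) := by
    rw [pvDictB, PySem.Dict.getD_foldl_modify_append, pvDictB0, pv_B0_getD_aux]
    simp
  rw [hg]

lemma pv_portA (results : List (String × List (String × String))) :
    group_models_by_provider results
      = (pvDictA results).items.map
          (fun p => (p.1, PySem.List.sorted p.2 (fun t => t.1) false)) := by
  unfold group_models_by_provider
  have h : (results.foldl (fun providers x =>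
      let d := PySem.Dict.mk x.2
      let family := d.getD "family" "unknown"
      let status := d.getD "result" "skip"
      let description := d.get? "description"
      let providers := if providers.contains family then providers else providers.insert family []
      providers.modify family [] (fun l => l ++ [(x.1, status, description)])) PySem.Dict.empty)
      = pvDictA results := by
    unfold pvDictA pvPairs
    rw [List.foldl_map]
    exact PySem.List.foldl_congr_mem _ _ _ _
      (fun acc x _ => pv_modify_setdefault acc (pvFam x) (fun l => l ++ [pvTrip x]))
  rw [h]

lemma pv_portB (results : List (String × List (String × String))) :
    group_models_by_provider_alt results = (pvDictB results).items := by
  unfold group_models_by_provider_alt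
  have h : (results.foldl (fun providers x =>
      let family := (PySem.Dict.mk x.2).getD "family" "unknown"
      if providers.contains family then providers else providers.insert family []) PySem.Dict.empty)
      = pvDictB0 results :=
    PySem.List.foldl_congr_mem _ _ _ _
      (fun acc x _ => pv_if_insert_eq_setdefault acc (pvFam x))
  rw [h]
  unfold pvDictB pvPairs
  rw [List.foldl_map]
  rfl

lemma pv_group_eq (L : List (String × List (String × String))) (k : String) :
    PySem.List.sorted (((pvPairs L).filter (fun p => p.1 == k)).map (fun p => p.2))
        (fun t => t.1) false
      = ((pvPairs (PySem.List.sorted L (fun kv => kv.1) false)).filter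
          (fun p => p.1 == k)).map (fun p => p.2) := by
  have hL : ((pvPairs L).filter (fun p => p.1 == k)).map (fun p => p.2)
      = (L.filter (fun x => pvFam x == k)).map pvTrip := by
    rw [pvPairs, List.filter_map, List.map_map]
    rfl
  have hS : ((pvPairs (PySem.List.sorted L (fun kv => kv.1) false)).filter
        (fun p => p.1 == k)).map (fun p => p.2)
      = ((PySem.List.sorted L (fun kv => kv.1) false).filter (fun x => pvFam x == k)).map pvTrip := by
    rw [pvPairs, List.filter_map, List.map_map]
    rfl
  rw [hL, hS,
    pv_sorted_map pvTrip (fun kv => kv.1) (fun t => t.1) (fun a => rfl),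
    pv_sorted_filter (fun kv => kv.1) (fun x => pvFam x == k) L]

lemma pv_main (results : List (String × List (String × String))) :
    group_models_by_provider results = group_models_by_provider_alt results := by
  rw [pv_portA, pv_portB, pv_dictA_items, pv_dictB_items, List.map_map]
  apply List.map_congr_left
  intro k _
  simp only [Function.comp]
  exact congrArg (fun v => (k, v)) (pv_group_eq results k)

-- ===== VERDICT (by name: the statement is the Claim_ definition above) =====
theorem group_models_by_provider_spec : Claim_equal_group_models_by_provider := by
  intro results _
  unfold Spec_group_models_by_provider
  exact pv_main results
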